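-- pv_equiv track=rewrite | github.com/Devi010203/yeast-mrna-halflife | code_release/src/analysis_and_plot/kmer/plot_kmer_enrichment.py | _scan_kmers
-- ===== SOURCE A (Python) =====
-- def _scan_kmers(seq: str, k: int, alphabet: set) -> set:
--     """返回序列中所有出现过的 k-mer（去重，用于 presence 统计）"""
--     s = seq.upper()
--     found = set()
--     for i in range(0, len(s) - k + 1):
--         kmer = s[i:i+k]
--         if set(kmer) <= alphabet:
--             found.add(kmer)
--     return found
-- ===== SOURCE B (Python) =====
-- def _scan_kmers(seq: str, k: int, alphabet: set) -> set:
--     """One-pass run-length scan: track the length of the current run of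
--     alphabet characters; a window ends at i exactly when the run reaches k."""
--     if k <= 0:
--         return {""}
--     s = seq.upper()
--     found = set()
--     run = 0
--     for i, ch in enumerate(s):
--         run = run + 1 if ch in alphabet else 0
--         if run >= k:
--             found.add(s[i - k + 1:i + 1])
--     return found
-- ===== Notes on version B (the rewrite author's own statement) =====
-- stated objective: faster
-- what changed: Instead of slicing every window and building a set of its characters to test subset-inclusion against the alphabet, B makes one pass keeping a run-length counter of consecutive alphabet characters and emits a window exactly when the run reaches k, testing each character once; k<=0 is handled by its closed form {""}.
-- intended difference: For k<0 with len(seq)+k>=1, Python's negative slice stop makes A's windows seq[i:i+k] wrap to seq[i:len(seq)+i+k] for i<-k, so A returns accidental substrings of length len(seq)+k besides "" whenever such a substring is all-alphabet; B returns {""}, the intended value, since no k-mer of negative length exists. — e.g. on _scan_kmers("AB", -1, ["A"]): A returns ["A", ""], B returns [""]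
import Mathlib
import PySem

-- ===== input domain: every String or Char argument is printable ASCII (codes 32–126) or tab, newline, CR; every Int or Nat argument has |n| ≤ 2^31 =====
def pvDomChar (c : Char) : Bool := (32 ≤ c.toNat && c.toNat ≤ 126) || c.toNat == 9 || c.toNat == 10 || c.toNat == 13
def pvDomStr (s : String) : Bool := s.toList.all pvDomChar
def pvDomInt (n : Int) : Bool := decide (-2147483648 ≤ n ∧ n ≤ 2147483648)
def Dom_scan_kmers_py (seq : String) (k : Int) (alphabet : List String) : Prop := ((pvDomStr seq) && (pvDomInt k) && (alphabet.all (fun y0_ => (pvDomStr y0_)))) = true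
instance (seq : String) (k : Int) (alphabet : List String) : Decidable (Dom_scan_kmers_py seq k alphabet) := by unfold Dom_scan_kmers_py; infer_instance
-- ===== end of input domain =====

-- B replaces the per-window set-build-and-subset test by a one-pass run-length
-- counter of consecutive alphabet characters (objective: faster, constant-factor).

-- ===== PORT A =====
def scan_kmers_py (seq : String) (k : Int) (alphabet : List String) : List String :=
  let s := PySem.Str.upper seq
  (PySem.List.pyRange 0 ((PySem.Str.len s) - k + 1) 1).foldl
    (fun found i =>
      let kmer := PySem.Str.slice s (some i) (some (i + k))
      if PySem.Set.issubset (PySem.Set.ofList (kmer.toList.map (fun c => String.ofList [c]))) alphabet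
      then PySem.Set.add found kmer
      else found)
    []

-- ===== PORT B =====
def scan_kmers_py_alt (seq : String) (k : Int) (alphabet : List String) : List String :=
  if k ≤ 0 then [""]
  else
    let s := PySem.Str.upper seq
    ((PySem.List.enumerate s.toList 0).foldl
      (fun (st : Int × List String) ic =>
        let run := if PySem.Set.contains alphabet (String.ofList [ic.2]) then st.1 + 1 else 0
        let found := if k ≤ run
          then PySem.Set.add st.2 (PySem.Str.slice s (some (ic.1 - k + 1)) (some (ic.1 + 1)))
          else st.2
        (run, found))
      (0, [])).2

-- ===== PRECONDITION & SPEC =====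
-- For k < 0 Python's negative slice stop makes A's windows seq[i:i+k] wrap around to
-- seq[i:len+i+k] for i < -k, so A returns accidental substrings of length len(seq)+k
-- (besides ""), whenever such a substring is all-alphabet; B returns {""} there, the
-- intended value, since no k-mer of negative length exists.
def D_scan_kmers_py (seq : String) (k : Int) (alphabet : List String) : Prop :=
  k < 0 ∧ 1 ≤ ((PySem.Str.upper seq).toList.length : Int) + k ∧
    ((List.range (-k).toNat).any (fun j =>
      (((PySem.Str.upper seq).toList.drop j).take (((PySem.Str.upper seq).toList.length : Int) + k).toNat).all
        (fun c => alphabet.contains (String.ofList [c])))) = true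
instance (seq : String) (k : Int) (alphabet : List String) : Decidable (D_scan_kmers_py seq k alphabet) := by
  unfold D_scan_kmers_py; infer_instance

def Spec_scan_kmers_py (seq : String) (k : Int) (alphabet : List String) (out : List String) : Prop :=
  ¬ D_scan_kmers_py seq k alphabet → out = scan_kmers_py_alt seq k alphabet
instance (seq : String) (k : Int) (alphabet : List String) (out : List String) : Decidable (Spec_scan_kmers_py seq k alphabet out) := by
  unfold Spec_scan_kmers_py; infer_instance

def pvDiffWitness_scan_kmers_py : String × Int × List String := ("AB", -1, ["A"])
def pvDiffWitnessOut_scan_kmers_py : (List String) × (List String) := (["A", ""], [""])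

-- ===== CLAIM (what is proved, stated in full; the proofs are below) =====
def Claim_unchanged_scan_kmers_py : Prop := ∀ (seq : String) (k : Int) (alphabet : List String), Dom_scan_kmers_py seq k alphabet → Spec_scan_kmers_py seq k alphabet (scan_kmers_py seq k alphabet)
def Claim_changed_scan_kmers_py : Prop := Dom_scan_kmers_py (pvDiffWitness_scan_kmers_py.1) (pvDiffWitness_scan_kmers_py.2.1) (pvDiffWitness_scan_kmers_py.2.2) ∧ D_scan_kmers_py (pvDiffWitness_scan_kmers_py.1) (pvDiffWitness_scan_kmers_py.2.1) (pvDiffWitness_scan_kmers_py.2.2) ∧ scan_kmers_py (pvDiffWitness_scan_kmers_py.1) (pvDiffWitness_scan_kmers_py.2.1) (pvDiffWitness_scan_kmers_py.2.2) = pvDiffWitnessOut_scan_kmers_py.1 ∧ scan_kmers_py_alt (pvDiffWitness_scan_kmers_py.1) (pvDiffWitness_scan_kmers_py.2.1) (pvDiffWitness_scan_kmers_py.2.2) = pvDiffWitnessOut_scan_kmers_py.2 ∧ pvDiffWitnessOut_scan_kmers_py.1 ≠ pvDiffWitnessOut_scan_kmers_py.2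
def Claim_exact_scan_kmers_py : Prop := ∀ (seq : String) (k : Int) (alphabet : List String), Dom_scan_kmers_py seq k alphabet → D_scan_kmers_py seq k alphabet → scan_kmers_py seq k alphabet ≠ scan_kmers_py_alt seq k alphabet

-- ===== LEMMAS AND PROOFS =====

-- `c` (as a one-character string) is in the alphabet
def pvGood (alphabet : List String) (c : Char) : Bool :=
  PySem.Set.contains alphabet (String.ofList [c])

-- length of the maximal all-alphabet suffix (B's run counter)
def pvRun (alphabet : List String) (l : List Char) : Int :=
  l.foldl (fun r c => if pvGood alphabet c then r + 1 else 0) 0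

-- A's loop body, with the subset test rewritten pointwise
def pvStepA (alphabet : List String) (k : Int) (s : String) : List String → Int → List String :=
  fun found i =>
    if (PySem.Str.slice s (some i) (some (i + k))).toList.all (pvGood alphabet)
    then PySem.Set.add found (PySem.Str.slice s (some i) (some (i + k)))
    else found

lemma pvCondA (alphabet : List String) (cs : List Char) :
    PySem.Set.issubset (PySem.Set.ofList (cs.map (fun c => String.ofList [c]))) alphabet
      = cs.all (pvGood alphabet) := by
  rw [Bool.eq_iff_iff, PySem.Set.issubset_iff, List.all_eq_true]
  constructor
  · intro h c hc
    have := h (String.ofList [c]) (by simp [PySem.Set.mem_ofList]; exact ⟨c, hc, rfl⟩)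
    simp [pvGood, PySem.Set.contains, this]
  · intro h x hx
    rw [PySem.Set.mem_ofList] at hx
    obtain ⟨c, hc, rfl⟩ := List.mem_map.mp hx
    have := h c hc
    simpa [pvGood, PySem.Set.contains] using this

lemma pvA_eq_fold (seq : String) (k : Int) (alphabet : List String) :
    scan_kmers_py seq k alphabet
      = (PySem.List.pyRange 0 (((PySem.Str.upper seq).toList.length : Int) - k + 1) 1).foldl
          (pvStepA alphabet k (PySem.Str.upper seq)) [] := by
  unfold scan_kmers_py
  simp only [PySem.Str.len]
  apply PySem.List.foldl_congr_mem
  intro acc i _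
  simp only [pvStepA, pvCondA]

lemma pvRun_append (alphabet : List String) (l : List Char) (c : Char) :
    pvRun alphabet (l ++ [c]) = if pvGood alphabet c then pvRun alphabet l + 1 else 0 := by
  simp [pvRun, List.foldl_append]

lemma pvRun_bounds (alphabet : List String) (l : List Char) :
    0 ≤ pvRun alphabet l ∧ pvRun alphabet l ≤ l.length := by
  induction l using List.reverseRecOn with
  | nil => simp [pvRun]
  | append_singleton l c ih => rw [pvRun_append]; split_ifs <;> simp <;> omega

lemma pvRun_ge_iff (alphabet : List String) (l : List Char) (K : Nat) (hK : 1 ≤ K) :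
    ((K : Int) ≤ pvRun alphabet l ↔ (K ≤ l.length ∧ ((l.drop (l.length - K)).all (pvGood alphabet) = true))) := by
  induction l using List.reverseRecOn generalizing K with
  | nil =>
    simp only [List.length_nil, List.drop_nil, List.all_nil]
    constructor
    · intro h; exfalso; simp [pvRun] at h; omega
    · rintro ⟨h, -⟩; exfalso; omega
  | append_singleton l c ih =>
    rw [pvRun_append]
    have hdrop : (l ++ [c]).drop ((l ++ [c]).length - K) = l.drop (l.length + 1 - K) ++ [c] := by
      rw [List.length_append, List.length_singleton,
        List.drop_append_of_le_length (by omega)]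
    rw [hdrop, List.length_append, List.length_singleton, List.all_append, List.all_cons,
      List.all_nil, Bool.and_true]
    by_cases hg : pvGood alphabet c = true
    · rw [hg, if_pos rfl, Bool.and_true]
      rcases Nat.lt_or_ge K 2 with h1 | h2
      · have hK1 : K = 1 := by omega
        subst hK1
        have hnn := (pvRun_bounds alphabet l).1
        have : l.length + 1 - 1 = l.length := by omega
        rw [this, List.drop_length]
        simp only [List.all_nil]
        constructor
        · intro _; exact ⟨by omega, by simp⟩
        · intro _; push_cast; omega
      · have hK1 : 1 ≤ K - 1 := by omega
        have hidx : l.length + 1 - K = l.length - (K - 1) := by omega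
        rw [hidx]
        have ihK := ih (K - 1) hK1
        constructor
        · intro h
          have h' : ((K - 1 : Nat) : Int) ≤ pvRun alphabet l := by push_cast; omega
          obtain ⟨ha, hb⟩ := ihK.mp h'
          exact ⟨by omega, hb⟩
        · rintro ⟨ha, hb⟩
          have h' := ihK.mpr ⟨by omega, hb⟩
          push_cast at h' ⊢; omega
    · simp only [Bool.not_eq_true] at hg
      rw [hg, if_neg (by simp), Bool.and_false]
      constructor
      · intro h; exfalso; omega
      · rintro ⟨-, h⟩; exact absurd h (by simp)

lemma pvMain (s : String) (k : Int) (alphabet : List String) (hk : 1 ≤ k)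
    (m : Nat) (hm : m ≤ s.toList.length) :
    (PySem.List.enumerate (s.toList.take m) 0).foldl
      (fun (st : Int × List String) ic =>
        let run := if PySem.Set.contains alphabet (String.ofList [ic.2]) then st.1 + 1 else 0
        let found := if k ≤ run
          then PySem.Set.add st.2 (PySem.Str.slice s (some (ic.1 - k + 1)) (some (ic.1 + 1)))
          else st.2
        (run, found))
      (0, [])
    = (pvRun alphabet (s.toList.take m),
       (PySem.List.pyRange 0 ((m : Int) - k + 1) 1).foldl (pvStepA alphabet k s) []) := by
  induction m with
  | zero =>
    rw [List.take_zero, PySem.List.pyRange_one_eq_nil (by omega)]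
    simp [pvRun, PySem.List.enumerate]
  | succ m ih =>
    have hmn : m < s.toList.length := by omega
    have ih' := ih (by omega)
    have htake : s.toList.take (m + 1) = s.toList.take m ++ [s.toList[m]] := by
      rw [List.take_succ]; simp [List.getElem?_eq_getElem hmn]
    have hlen : (s.toList.take m).length = m := List.length_take_of_le (by omega)
    rw [htake, PySem.List.enumerate_append, List.foldl_append, ih', hlen]
    simp only [PySem.List.enumerate, List.foldl_cons, List.foldl_nil, zero_add]
    set c := s.toList[m] with hc
    set run' : Int := if PySem.Set.contains alphabet (String.ofList [c]) then
        pvRun alphabet (s.toList.take m) + 1 else 0 with hrun'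
    have hrun_eq : run' = pvRun alphabet (s.toList.take m ++ [c]) := by
      rw [pvRun_append]; rfl
    have hlen1 : (s.toList.take m ++ [c]).length = m + 1 := by
      rw [List.length_append, hlen]; rfl
    have hrun_le : run' ≤ (m : Int) + 1 := by
      have hb := (pvRun_bounds alphabet (s.toList.take m ++ [c])).2
      rw [hlen1] at hb
      rw [hrun_eq]
      exact_mod_cast hb
    have hcast : ((m + 1 : Nat) : Int) - k + 1 = ((m : Int) - k + 1) + 1 := by push_cast; ring
    refine Prod.ext ?_ ?_
    · simpa using hrun_eq
    · simp only []
      by_cases hkm : k ≤ (m : Int) + 1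
      · -- the new window exists
        have hik : (m : Int) - k + 1 + k = (m : Int) + 1 := by ring
        set K := k.toNat with hK
        have hKk : (K : Int) = k := Int.toNat_of_nonneg (by omega)
        have hK1 : 1 ≤ K := by omega
        have hKm : K ≤ m + 1 := by omega
        have hwin : (PySem.Str.slice s (some ((m : Int) - k + 1)) (some ((m : Int) + 1))).toList
            = (s.toList.drop (m + 1 - K)).take K := by
          rw [PySem.Str.toList_slice, PySem.Chars.slice_eq_listSlice,
            PySem.List.slice_toNat _ (by omega) (by omega)]
          have h1 : ((m : Int) + 1).toNat = m + 1 := by omega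
          have h2 : ((m : Int) - k + 1).toNat = m + 1 - K := by omega
          rw [h1, h2]
          congr 1
          omega
        have hiff : (k ≤ run') ↔
            ((PySem.Str.slice s (some ((m : Int) - k + 1)) (some ((m : Int) + 1))).toList.all
              (pvGood alphabet) = true) := by
          rw [hwin, hrun_eq, ← hKk]
          rw [pvRun_ge_iff alphabet _ K hK1, hlen1]
          have hdt : (s.toList.take m ++ [c]).drop (m + 1 - K)
              = (s.toList.take (m+1)).drop (m + 1 - K) := by rw [htake]
          rw [hdt, List.drop_take]
          have : m + 1 - (m + 1 - K) = K := by omega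
          rw [this]
          constructor
          · rintro ⟨-, h⟩; exact h
          · intro h; exact ⟨by omega, h⟩
        have hstep : ∀ acc, pvStepA alphabet k s acc ((m : Int) - k + 1)
            = if (PySem.Str.slice s (some ((m : Int) - k + 1)) (some ((m : Int) + 1))).toList.all
                  (pvGood alphabet)
              then PySem.Set.add acc (PySem.Str.slice s (some ((m : Int) - k + 1)) (some ((m : Int) + 1)))
              else acc := by
          intro acc
          simp only [pvStepA]
          rw [hik]
        have hA : List.foldl (pvStepA alphabet k s) [] (PySem.List.pyRange 0 (((m : Int) - k + 1) + 1))
            = pvStepA alphabet k s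
                (List.foldl (pvStepA alphabet k s) [] (PySem.List.pyRange 0 ((m : Int) - k + 1)))
                ((m : Int) - k + 1) := by
          rw [PySem.List.pyRange_one_succ_right (a := 0) (b := (m : Int) - k + 1) (by omega),
            List.foldl_append, List.foldl_cons, List.foldl_nil]
        rw [hcast, hA, hstep]
        by_cases hcond : k ≤ run'
        · rw [if_pos hcond, if_pos (hiff.mp hcond)]
        · rw [if_neg hcond, if_neg (fun h => hcond (hiff.mpr h))]
      · -- no window yet: both folds are over empty ranges
        have h1 : PySem.List.pyRange 0 ((m : Int) - k + 1) = [] :=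
          PySem.List.pyRange_one_eq_nil (by omega)
        have h2 : PySem.List.pyRange 0 (((m + 1 : Nat) : Int) - k + 1) = [] :=
          PySem.List.pyRange_one_eq_nil (by push_cast; omega)
        have hnc : ¬ (k ≤ run') := by omega
        rw [h1, h2]
        simp only [List.foldl_nil]
        rw [if_neg hnc]

-- empty slice when the (clamped) stop is at or before the (clamped) start
lemma pvSlice_empty (s : String) (a b : Int) (h0 : 0 ≤ a)
    (h : (0 ≤ b ∧ b ≤ a) ∨ (b < 0 ∧ (s.toList.length : Int) + b ≤ a)) :
    PySem.Str.slice s (some a) (some b) = "" := by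
  have hl : PySem.Chars.slice s.toList (some a) (some b) = [] := by
    rw [PySem.Chars.slice_eq_listSlice]
    show List.take _ (List.drop _ _) = []
    have hz : PySem.List.clampIdx s.toList.length b - PySem.List.clampIdx s.toList.length a = 0 := by
      unfold PySem.List.clampIdx
      split_ifs <;> omega
    rw [hz, List.take_zero]
  unfold PySem.Str.slice
  rw [hl]

-- the wrap-around window of a negative-k slice
lemma pvSlice_neg (s : String) (i k : Int) (h0 : 0 ≤ i) (hneg : i + k < 0)
    (hn : 1 ≤ (s.toList.length : Int) + k) :
    (PySem.Str.slice s (some i) (some (i + k))).toList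
      = (s.toList.drop i.toNat).take ((s.toList.length : Int) + k).toNat := by
  rw [PySem.Str.toList_slice, PySem.Chars.slice_eq_listSlice]
  show List.take (PySem.List.clampIdx s.toList.length (i + k) - PySem.List.clampIdx s.toList.length i)
      (List.drop (PySem.List.clampIdx s.toList.length i) s.toList) = _
  have h1 : PySem.List.clampIdx s.toList.length i = i.toNat := by
    unfold PySem.List.clampIdx; split_ifs <;> omega
  rw [h1]
  congr 1
  unfold PySem.List.clampIdx
  split_ifs <;> omega

lemma pvFoldEmptyA (P : Int → Bool) (L : List Int) :
    L.foldl (fun f i => if P i then PySem.Set.add f "" else f) [""] = [""] := by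
  induction L with
  | nil => rfl
  | cons i L ih =>
    rw [List.foldl_cons]
    have : (if P i then PySem.Set.add [""] "" else [""]) = [""] := by
      split_ifs <;> simp [PySem.Set.add]
    rw [this, ih]

lemma pvFoldEmptyB (P : Int → Bool) (L : List Int) :
    L.foldl (fun f i => if P i then PySem.Set.add f "" else f) [] = if L.any P then [""] else [] := by
  induction L with
  | nil => rfl
  | cons i L ih =>
    rw [List.foldl_cons, List.any_cons]
    by_cases h : P i = true
    · rw [h, if_pos rfl]
      have : PySem.Set.add ([] : List String) "" = [""] := by simp [PySem.Set.add]
      rw [this, pvFoldEmptyA]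
      simp
    · simp only [Bool.not_eq_true] at h
      rw [h, if_neg (by simp), ih]
      simp

lemma pvMemFold (alphabet : List String) (k : Int) (s : String) (L : List Int)
    (acc : List String) (x : String) (hx : x ∈ acc) :
    x ∈ L.foldl (pvStepA alphabet k s) acc := by
  induction L generalizing acc with
  | nil => exact hx
  | cons i L ih =>
    rw [List.foldl_cons]
    apply ih
    unfold pvStepA
    split_ifs
    · exact (PySem.Set.mem_add _ _ _).mpr (Or.inl hx)
    · exact hx

lemma pvMemFold2 (alphabet : List String) (k : Int) (s : String) (L : List Int)
    (i : Int)
    (hc : (PySem.Str.slice s (some i) (some (i + k))).toList.all (pvGood alphabet) = true) :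
    ∀ (acc : List String), i ∈ L →
      PySem.Str.slice s (some i) (some (i + k)) ∈ L.foldl (pvStepA alphabet k s) acc := by
  induction L with
  | nil => intro acc hi; cases hi
  | cons a L ih =>
    intro acc hi
    rw [List.foldl_cons]
    rcases List.mem_cons.mp hi with rfl | hi'
    · apply pvMemFold
      unfold pvStepA
      rw [if_pos hc]
      exact (PySem.Set.mem_add _ _ _).mpr (Or.inr rfl)
    · exact ih _ hi'

-- ===== VERDICT (by name: the statements are the Claim_ definitions above) =====
theorem scan_kmers_py_spec : Claim_unchanged_scan_kmers_py := by
  intro seq k alphabet _ hD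
  by_cases hk : 1 ≤ k
  · -- positive k: run-length pass = window scan
    have hmain := pvMain (PySem.Str.upper seq) k alphabet hk
      (PySem.Str.upper seq).toList.length le_rfl
    rw [List.take_length] at hmain
    rw [pvA_eq_fold]
    conv_rhs => unfold scan_kmers_py_alt
    rw [if_neg (by omega)]
    simp only []
    rw [hmain]
  · -- k ≤ 0: both return {""}
    push_neg at hk
    have hk0 : k ≤ 0 := by omega
    conv_rhs => unfold scan_kmers_py_alt
    rw [if_pos hk0]
    rw [pvA_eq_fold]
    unfold D_scan_kmers_py at hD
    set s := PySem.Str.upper seq with hs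
    set n : Int := (s.toList.length : Int) with hn
    have hnn : 0 ≤ n := by positivity
    -- from ¬D_: for k < 0, either all windows are empty or no wrap window is all-alphabet
    have hD' : k < 0 → 1 ≤ n + k →
        ((List.range (-k).toNat).any (fun j =>
          ((s.toList.drop j).take (n + k).toNat).all
            (fun c => alphabet.contains (String.ofList [c])))) = false := by
      intro h1 h2
      cases hb : ((List.range (-k).toNat).any (fun j =>
          ((s.toList.drop j).take (n + k).toNat).all
            (fun c => alphabet.contains (String.ofList [c])))) with
      | false => rfl
      | true => exact absurd ⟨h1, h2, hb⟩ hD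
    have hcongr : ∀ (acc : List String), ∀ i ∈ PySem.List.pyRange 0 (n - k + 1) 1,
        pvStepA alphabet k s acc i
          = (fun (f : List String) (i : Int) =>
              if (PySem.Str.slice s (some i) (some (i + k))).toList.all (pvGood alphabet)
              then PySem.Set.add f "" else f) acc i := by
      intro acc i hi
      have h0 : 0 ≤ i := (PySem.List.mem_pyRange_one.mp hi).1
      by_cases hineg : i + k < 0
      · by_cases hnk : 1 ≤ n + k
        · -- wrap window: not all-alphabet, so both sides skip
          have hfalse : (PySem.Str.slice s (some i) (some (i + k))).toList.all (pvGood alphabet) = false := by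
            rw [pvSlice_neg s i k h0 hineg hnk]
            have hmem : i.toNat ∈ List.range (-k).toNat := List.mem_range.mpr (by omega)
            have := List.any_eq_false.mp (hD' (by omega) hnk) i.toNat hmem
            simpa [pvGood, PySem.Set.contains] using this
          show (if (PySem.Str.slice s (some i) (some (i + k))).toList.all (pvGood alphabet)
              then PySem.Set.add acc (PySem.Str.slice s (some i) (some (i + k))) else acc)
            = (if (PySem.Str.slice s (some i) (some (i + k))).toList.all (pvGood alphabet)
              then PySem.Set.add acc "" else acc)
          rw [hfalse]
          simp
        · -- every window is empty
          show (if (PySem.Str.slice s (some i) (some (i + k))).toList.all (pvGood alphabet)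
              then PySem.Set.add acc (PySem.Str.slice s (some i) (some (i + k))) else acc)
            = (if (PySem.Str.slice s (some i) (some (i + k))).toList.all (pvGood alphabet)
              then PySem.Set.add acc "" else acc)
          rw [pvSlice_empty s i (i + k) h0 (Or.inr ⟨hineg, by omega⟩)]
      · -- stop index clamps at or before start: empty window
        show (if (PySem.Str.slice s (some i) (some (i + k))).toList.all (pvGood alphabet)
            then PySem.Set.add acc (PySem.Str.slice s (some i) (some (i + k))) else acc)
          = (if (PySem.Str.slice s (some i) (some (i + k))).toList.all (pvGood alphabet)
            then PySem.Set.add acc "" else acc)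
        rw [pvSlice_empty s i (i + k) h0 (Or.inl ⟨by omega, by omega⟩)]
    rw [PySem.List.foldl_congr_mem _ _ _ _ (fun acc x hx => hcongr acc x hx)]
    rw [pvFoldEmptyB]
    have hany : (PySem.List.pyRange 0 (n - k + 1) 1).any
        (fun i => (PySem.Str.slice s (some i) (some (i + k))).toList.all (pvGood alphabet)) = true := by
      refine List.any_eq_true.mpr ⟨-k, PySem.List.mem_pyRange_one.mpr ⟨by omega, by omega⟩, ?_⟩
      rw [pvSlice_empty s (-k) (-k + k) (by omega) (Or.inl ⟨by omega, by omega⟩)]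
      rfl
    rw [hany, if_pos rfl]

theorem scan_kmers_py_changed : Claim_changed_scan_kmers_py := by
  unfold Claim_changed_scan_kmers_py; decide

theorem scan_kmers_py_tight : Claim_exact_scan_kmers_py := by
  intro seq k alphabet _ hD
  unfold D_scan_kmers_py at hD
  obtain ⟨hk, hnk, hany⟩ := hD
  set s := PySem.Str.upper seq with hs
  set n : Int := (s.toList.length : Int) with hn
  have hnn : 0 ≤ n := by positivity
  obtain ⟨j, hjmem, hjall⟩ := List.any_eq_true.mp hany
  have hj : j < (-k).toNat := List.mem_range.mp hjmem
  set w := PySem.Str.slice s (some (j : Int)) (some ((j : Int) + k)) with hw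
  have hj' : (j : Int) < -k := by omega
  have hwl : w.toList = (s.toList.drop j).take (n + k).toNat := by
    rw [hw, pvSlice_neg s (j : Int) k (Int.natCast_nonneg j) (by omega) hnk, Int.toNat_natCast]
  have hcond : w.toList.all (pvGood alphabet) = true := by
    rw [hwl]
    simpa [pvGood, PySem.Set.contains] using hjall
  have hcond' : (PySem.Str.slice s (some (j : Int)) (some ((j : Int) + k))).toList.all
      (pvGood alphabet) = true := by rw [← hw]; exact hcond
  have hjm : (j : Int) ∈ PySem.List.pyRange 0 (n - k + 1) 1 :=
    PySem.List.mem_pyRange_one.mpr ⟨by omega, by omega⟩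
  have hmemA : w ∈ scan_kmers_py seq k alphabet := by
    rw [pvA_eq_fold]
    exact pvMemFold2 alphabet k s _ (j : Int) hcond' [] hjm
  have hwne : w ≠ "" := by
    intro h
    have : w.toList.length = 0 := by rw [h]; rfl
    rw [hwl] at this
    rw [List.length_take, List.length_drop] at this
    omega
  have hB : scan_kmers_py_alt seq k alphabet = [""] := by
    unfold scan_kmers_py_alt
    rw [if_pos (by omega)]
  intro heq
  rw [heq, hB] at hmemA
  exact hwne (by simpa using hmemA)
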